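-- pv_equiv track=rewrite | github.com/egalleye/katas | sort_odds_only.py | sort_odds_only
-- ===== SOURCE A (Python) =====
-- def sort_odds_only(source_array):
--     odds_list = []
--     final_list = []
--     itor = 0
--     for num in source_array:
--         if (num % 2 == 0):
--             final_list.append(num)
--         else:
--             odds_list.append(num)
--             final_list.append(-1)
--     odds_list.sort(reverse=True)
--     for num in final_list:
--         if (num == -1):
--             final_list[itor] = odds_list.pop()
--         itor += 1
--     return final_list
-- ===== SOURCE B (Python) =====
-- def sort_odds_only(source_array):
--     work = list(source_array)
--     out = []
--     while work:
--         head = work.pop(0)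
--         if head % 2 == 0:
--             out.append(head)
--             continue
--         m = head
--         for v in work:
--             if v % 2 != 0 and v < m:
--                 m = v
--         if m < head:
--             work[work.index(m)] = head
--         out.append(m)
--     return out
-- ===== Notes on version B (the rewrite author's own statement) =====
-- stated objective: alternative
-- what changed: A extracts the odd values, library-sorts them descending and pops them back over a -1-sentinel copy in a second pass; B never calls a sort: it runs a selection pass over a shrinking work list, scanning for the minimum remaining odd value and swapping the current odd element into its place, trading the O(n log n) sort for an O(n^2) selection.
import Mathlib
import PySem

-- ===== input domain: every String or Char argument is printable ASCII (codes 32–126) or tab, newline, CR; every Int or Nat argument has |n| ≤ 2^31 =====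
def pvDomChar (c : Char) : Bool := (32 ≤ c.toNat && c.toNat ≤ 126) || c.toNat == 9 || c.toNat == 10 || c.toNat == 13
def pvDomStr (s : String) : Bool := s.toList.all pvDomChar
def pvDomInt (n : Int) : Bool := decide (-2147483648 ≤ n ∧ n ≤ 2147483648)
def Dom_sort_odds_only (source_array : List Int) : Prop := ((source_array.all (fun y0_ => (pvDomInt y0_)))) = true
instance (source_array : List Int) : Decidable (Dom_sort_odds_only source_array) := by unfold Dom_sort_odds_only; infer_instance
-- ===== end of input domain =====

-- B replaces A's "extract odds, library-sort descending, pop back over a -1-sentinel copy" by a sort-free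
-- selection pass over a shrinking work list (scan for the minimum remaining odd, swap it in) ('alternative', quadratic).

-- ===== PORT A =====
-- A's second loop: "for num in final_list: if num == -1: final_list[itor] = odds_list.pop(); itor += 1".
-- The assignment only touches the position just read, so it is the structural recursion below over the list,
-- carrying odds_list and popping its LAST element (Python pop()).  The 'none' branch is where Python's pop()
-- would raise IndexError; it is unreachable (the sentinel count always equals the length of odds_list).
def pvFillA : List Int → List Int → List Int
  | [], _ => []
  | x :: rest, odds =>
    if x = -1 then
      match PySem.List.pop? odds with
      | some (v, odds') => v :: pvFillA rest odds'
      | none => x :: pvFillA rest odds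
    else x :: pvFillA rest odds

def sort_odds_only (source_array : List Int) : List Int :=
  -- first loop: build odds_list and final_list (evens kept, odds replaced by the sentinel -1)
  let p := source_array.foldl
    (fun (acc : List Int × List Int) num =>
      if PySem.Int.mod num 2 = 0 then (acc.1, acc.2 ++ [num])
      else (acc.1 ++ [num], acc.2 ++ [-1]))
    ([], [])
  -- odds_list.sort(reverse=True)
  let odds := PySem.List.sorted p.1 (fun x => x) true
  pvFillA p.2 odds

-- ===== PORT B =====
-- inner loop "m = head; for v in work: if v % 2 != 0 and v < m: m = v"
def pvSelMin (tail : List Int) (head : Int) : Int :=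
  tail.foldl (fun m v => if PySem.Int.mod v 2 ≠ 0 ∧ v < m then v else m) head

-- the while loop: pop the head, keep evens, for odds select the minimum remaining odd and swap it in.
-- The 'none' branch of index? is where Python's list.index would raise ValueError; it is unreachable
-- (m < head forces m to be an element of the remaining work list).
def pvLoopB (work out : List Int) : List Int :=
  match work with
  | [] => out
  | head :: tail =>
    if PySem.Int.mod head 2 = 0 then pvLoopB tail (out ++ [head])
    else
      let m := pvSelMin tail head
      if m < head then
        match PySem.List.index? tail m with
        | some k => pvLoopB (PySem.List.pySetD tail (k : Int) head) (out ++ [m])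
        | none => out ++ [m]
      else pvLoopB tail (out ++ [m])
termination_by work.length
decreasing_by all_goals simp

def sort_odds_only_alt (source_array : List Int) : List Int := pvLoopB source_array []

-- ===== PRECONDITION & SPEC =====
def Spec_sort_odds_only (source_array : List Int) (out : List Int) : Prop := out = sort_odds_only_alt source_array
instance (source_array : List Int) (out : List Int) : Decidable (Spec_sort_odds_only source_array out) := by unfold Spec_sort_odds_only; infer_instance

-- ===== CLAIM (what is proved, stated in full; the proofs are below) =====
def Claim_equal_sort_odds_only : Prop := ∀ (source_array : List Int), Dom_sort_odds_only source_array → Spec_sort_odds_only source_array (sort_odds_only source_array)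

-- ===== LEMMAS AND PROOFS =====

-- the Bool test "n % 2 != 0" and the sentinel map "n if n even else -1"
def pvOddB (n : Int) : Bool := decide (PySem.Int.mod n 2 ≠ 0)
def pvSent (n : Int) : Int := if PySem.Int.mod n 2 = 0 then n else -1

theorem pvMod2 (x : Int) : PySem.Int.mod x 2 = x % 2 :=
  PySem.Int.mod_eq_emod_of_pos (by norm_num)

theorem pvSent_even {x : Int} (h : PySem.Int.mod x 2 = 0) : pvSent x = x := by
  unfold pvSent; rw [if_pos h]

theorem pvSent_odd {x : Int} (h : ¬ PySem.Int.mod x 2 = 0) : pvSent x = -1 := by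
  unfold pvSent; rw [if_neg h]

-- common reference: walk the list, replacing each odd element by the next value of asc
def pvFill : List Int → List Int → List Int
  | [], _ => []
  | x :: rest, asc =>
    if PySem.Int.mod x 2 = 0 then x :: pvFill rest asc
    else match asc with
      | v :: t => v :: pvFill rest t
      | [] => x :: pvFill rest []

-- A's first loop produces (odd values in order, sentinel image)
theorem phase1 (src : List Int) (o f : List Int) :
    src.foldl
      (fun (acc : List Int × List Int) num =>
        if PySem.Int.mod num 2 = 0 then (acc.1, acc.2 ++ [num])
        else (acc.1 ++ [num], acc.2 ++ [-1]))
      (o, f) = (o ++ src.filter pvOddB, f ++ src.map pvSent) := by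
  induction src generalizing o f with
  | nil => simp
  | cons x rest ih =>
    simp only [List.foldl_cons]
    by_cases h : PySem.Int.mod x 2 = 0
    · have he : x % 2 = 0 := by
        have := (PySem.Int.mod_eq_zero_iff_dvd x 2).mp h; omega
      have hb : pvOddB x = false := by simp [pvOddB]; omega
      rw [if_pos h, ih]
      simp [hb, pvSent]
      intro h'
      exact absurd h' (by omega)
    · have ho : x % 2 = 1 := by
        have h2 := PySem.Int.mod_eq_emod_of_pos (a := x) (b := 2) (by norm_num)
        rw [h2] at h; omega
      have hb : pvOddB x = true := by simp [pvOddB]; omega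
      rw [if_neg h, ih]
      simp [hb, pvSent]
      intro h'
      exact absurd h' (by omega)

-- descending sort of Ints is the reverse of the ascending sort
theorem sorted_rev_eq_reverse (xs : List Int) :
    PySem.List.sorted xs (fun x => x) true = (PySem.List.sorted xs (fun x => x) false).reverse := by
  have h := PySem.List.eq_of_perm_of_pairwise_le_of_injective
    (l₁ := (PySem.List.sorted xs (fun x => x) true).reverse)
    (l₂ := PySem.List.sorted xs (fun x => x) false)
    (fun x => x) (fun a b hab => hab)
    (((PySem.List.sorted_perm xs (fun x => x) true).symm.trans
        (List.reverse_perm _).symm).symm.trans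
      (PySem.List.sorted_perm xs (fun x => x) false).symm)
    (List.pairwise_reverse.mpr (PySem.List.sorted_pairwise_rev xs (fun x => x)))
    (PySem.List.sorted_pairwise xs (fun x => x))
  calc PySem.List.sorted xs (fun x => x) true
      = (PySem.List.sorted xs (fun x => x) true).reverse.reverse := by simp
    _ = (PySem.List.sorted xs (fun x => x) false).reverse := by rw [h]

theorem even_ne_neg_one {x : Int} (h : PySem.Int.mod x 2 = 0) : x ≠ -1 := by
  rw [pvMod2] at h; intro hx; subst hx; simp at h

-- A's second loop on the sentinel image, popping from the reversed ascending list, is pvFill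
theorem fillA_eq (src : List Int) : ∀ asc : List Int, src.countP pvOddB ≤ asc.length →
    pvFillA (src.map pvSent) asc.reverse = pvFill src asc := by
  induction src with
  | nil => intro asc _; rfl
  | cons x rest ih =>
    intro asc hlen
    by_cases h : PySem.Int.mod x 2 = 0
    · have hx : x ≠ -1 := even_ne_neg_one h
      have he : x % 2 = 0 := by
        have := (PySem.Int.mod_eq_zero_iff_dvd x 2).mp h; omega
      have hb : pvOddB x = false := by simp [pvOddB]; omega
      have hlen' : rest.countP pvOddB ≤ asc.length := by
        simpa [List.countP_cons, hb] using hlen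
      have hs : pvSent x = x := by
        simp [pvSent]
        intro h'; exact absurd h' (by omega)
      have key : pvFillA (x :: rest.map pvSent) asc.reverse
          = x :: pvFillA (rest.map pvSent) asc.reverse := by
        simp [pvFillA, hx]
      rw [List.map_cons, hs, key, ih asc hlen']
      simp [pvFill]
      intro h'
      exact absurd h' (by omega)
    · have ho : x % 2 = 1 := by
        have h2 := PySem.Int.mod_eq_emod_of_pos (a := x) (b := 2) (by norm_num)
        rw [h2] at h; omega
      have hb : pvOddB x = true := by simp [pvOddB]; omega
      have hc : rest.countP pvOddB + 1 ≤ asc.length := by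
        simpa [List.countP_cons, hb] using hlen
      cases asc with
      | nil => simp at hc
      | cons v t =>
        have hlen' : rest.countP pvOddB ≤ t.length := by
          simpa using hc
        have hs : pvSent x = -1 := by
          simp [pvSent]
          intro h'; exact absurd h' (by omega)
        have key : pvFillA ((-1) :: rest.map pvSent) ((v :: t).reverse)
            = v :: pvFillA (rest.map pvSent) t.reverse := by
          rw [List.reverse_cons]
          simp [pvFillA, PySem.List.pop?_last]
        rw [List.map_cons, hs, key, ih t hlen']
        simp [pvFill]
        intro h'
        exact absurd h' (by omega)

-- selection-scan spec: the fold returns the minimum of head and the odd elements of tail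
theorem pvSelMin_spec (tail : List Int) : ∀ head : Int,
    (pvSelMin tail head = head ∨
      (pvSelMin tail head ∈ tail ∧ pvOddB (pvSelMin tail head) = true)) ∧
    pvSelMin tail head ≤ head ∧
    (∀ v ∈ tail, pvOddB v = true → pvSelMin tail head ≤ v) := by
  induction tail with
  | nil => intro head; exact ⟨Or.inl rfl, le_refl _, by simp⟩
  | cons w t ih =>
    intro head
    have hstep : pvSelMin (w :: t) head
        = pvSelMin t (if PySem.Int.mod w 2 ≠ 0 ∧ w < head then w else head) := rfl
    by_cases hc : PySem.Int.mod w 2 ≠ 0 ∧ w < head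
    · obtain ⟨hm, hle, hall⟩ := ih w
      rw [hstep, if_pos hc]
      refine ⟨?_, ?_, ?_⟩
      · rcases hm with h1 | ⟨h1, h2⟩
        · refine Or.inr ⟨by simp [h1], ?_⟩
          have := hc.1; rw [pvMod2] at this
          simp only [h1, pvOddB, pvMod2]
          simpa using this
        · exact Or.inr ⟨List.mem_cons_of_mem _ h1, h2⟩
      · exact hle.trans hc.2.le
      · intro v hv hodd
        rcases List.mem_cons.mp hv with rfl | hv'
        · exact hle
        · exact hall v hv' hodd
    · obtain ⟨hm, hle, hall⟩ := ih head
      rw [hstep, if_neg hc]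
      refine ⟨?_, hle, ?_⟩
      · rcases hm with h1 | ⟨h1, h2⟩
        · exact Or.inl h1
        · exact Or.inr ⟨List.mem_cons_of_mem _ h1, h2⟩
      · intro v hv hodd
        rcases List.mem_cons.mp hv with rfl | hv'
        · -- ¬(odd v ∧ v < head) and v odd, so head ≤ v
          have hodd' : PySem.Int.mod v 2 ≠ 0 := by simpa [pvOddB] using hodd
          have : ¬ v < head := fun hlt => hc ⟨hodd', hlt⟩
          exact le_trans hle (not_lt.mp this)
        · exact hall v hv' hodd

-- pvFill only looks at the parity pattern and the even values
theorem pvFill_congr : ∀ (xs ys t : List Int), xs.map pvSent = ys.map pvSent →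
    xs.countP pvOddB ≤ t.length → pvFill xs t = pvFill ys t := by
  intro xs
  induction xs with
  | nil =>
    intro ys t hmap _
    have : ys = [] := by
      cases ys with
      | nil => rfl
      | cons y ys' => simp at hmap
    subst this; rfl
  | cons x xs' ih =>
    intro ys t hmap hcnt
    cases ys with
    | nil => simp at hmap
    | cons y ys' =>
      simp only [List.map_cons, List.cons.injEq] at hmap
      obtain ⟨hxy, htailmap⟩ := hmap
      by_cases hx : PySem.Int.mod x 2 = 0
      · -- x even: pvSent x = x, so pvSent y = x and y must be even (− an odd y would map to -1, odd)
        have hsx : pvSent x = x := pvSent_even hx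
        have hy : PySem.Int.mod y 2 = 0 := by
          by_contra hy
          have hsy : pvSent y = -1 := pvSent_odd hy
          rw [hsx, hsy] at hxy
          exact even_ne_neg_one hx hxy
        have hvals : x = y := by
          have hsy : pvSent y = y := pvSent_even hy
          rw [hsx, hsy] at hxy; exact hxy
        have hbx : pvOddB x = false := by unfold pvOddB; simpa using hx
        have hcnt' : xs'.countP pvOddB ≤ t.length := by
          simpa [List.countP_cons, hbx] using hcnt
        simp only [pvFill, if_pos hx, if_pos hy]
        rw [hvals]
        rw [ih ys' t htailmap hcnt']
      · -- x odd: pvSent x = -1, so y is odd too (an even y maps to itself, never -1)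
        have hsx : pvSent x = -1 := pvSent_odd hx
        have hy : ¬ PySem.Int.mod y 2 = 0 := by
          intro hy
          have hsy : pvSent y = y := pvSent_even hy
          rw [hsx, hsy] at hxy
          exact even_ne_neg_one hy hxy.symm
        have hbx : pvOddB x = true := by unfold pvOddB; simpa using hx
        have hcnt2 : xs'.countP pvOddB + 1 ≤ t.length := by
          simpa [List.countP_cons, hbx] using hcnt
        cases t with
        | nil => simp at hcnt2
        | cons v t' =>
          have hcnt' : xs'.countP pvOddB ≤ t'.length := by simpa using hcnt2
          simp only [pvFill, if_neg hx, if_neg hy]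
          rw [ih ys' t' htailmap hcnt']

theorem set_at_length (pre suf : List Int) (a b : Int) :
    (pre ++ a :: suf).set pre.length b = pre ++ b :: suf := by
  induction pre with
  | nil => rfl
  | cons p ps ih => simp [ih]

-- ys sorted-and-perm characterisation of sorted, specialised: prepending the minimum
theorem sorted_cons_min (x : Int) (l : List Int)
    (hmin : ∀ y ∈ l, x ≤ y) :
    PySem.List.sorted (x :: l) (fun v => v) false
      = x :: PySem.List.sorted l (fun v => v) false := by
  apply PySem.List.sorted_id_eq_of_perm_of_pairwise
  · exact List.Perm.cons x (PySem.List.sorted_perm l (fun v => v) false)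
  · refine List.pairwise_cons.mpr ⟨?_, PySem.List.sorted_pairwise l (fun v => v)⟩
    intro y hy
    exact hmin y (((PySem.List.sorted_perm _ _ _).mem_iff).mp hy)

-- B's while loop is pvFill over the ascending sort of the odds
theorem loopB_eq (n : Nat) : ∀ work out : List Int, work.length = n →
    pvLoopB work out
      = out ++ pvFill work (PySem.List.sorted (work.filter pvOddB) (fun x => x) false) := by
  induction n using Nat.strong_induction_on with
  | _ n ih =>
    intro work out hlen
    cases work with
    | nil => simp [pvLoopB, pvFill]
    | cons head tail =>
      have htl : tail.length < n := by simp at hlen; omega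
      by_cases hh : PySem.Int.mod head 2 = 0
      · -- even head: keep it, recurse
        have hb : pvOddB head = false := by unfold pvOddB; simpa using hh
        have hrec := ih tail.length htl tail (out ++ [head]) rfl
        have hf : (head :: tail).filter pvOddB = tail.filter pvOddB := by simp [hb]
        have hstep : pvFill (head :: tail)
              (PySem.List.sorted (tail.filter pvOddB) (fun x => x) false)
            = head :: pvFill tail (PySem.List.sorted (tail.filter pvOddB) (fun x => x) false) := by
          simp only [pvFill]; rw [if_pos hh]
        simp only [pvLoopB, if_pos hh]
        rw [hrec, hf, hstep]
        simp
      · -- odd head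
        have hb : pvOddB head = true := by unfold pvOddB; simpa using hh
        obtain ⟨hmem, hleh, hall⟩ := pvSelMin_spec tail head
        set m := pvSelMin tail head with hm
        have hfilt : (head :: tail).filter pvOddB = head :: tail.filter pvOddB := by
          simp [hb]
        by_cases hlt : m < head
        · -- swap the minimum odd m (first occurrence in tail) with head, recurse
          obtain ⟨hmt, hmodd⟩ : m ∈ tail ∧ pvOddB m = true := by
            rcases hmem with h1 | h2
            · rw [h1] at hlt; exact absurd hlt (lt_irrefl _)
            · exact h2
          have hmodd' : ¬ PySem.Int.mod m 2 = 0 := by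
            simpa [pvOddB] using hmodd
          obtain ⟨k, hk⟩ : ∃ k, PySem.List.index? tail m = some k := by
            have := (PySem.List.index?_isSome_iff (xs := tail) (v := m)).mpr hmt
            exact Option.isSome_iff_exists.mp this
          obtain ⟨pre, suf, hdecomp, hklen, -⟩ := (PySem.List.index?_eq_some_iff _ _ _).mp hk
          have hset : PySem.List.pySetD tail (k : Int) head = pre ++ head :: suf := by
            rw [PySem.List.pySetD_natCast, hdecomp, ← hklen, set_at_length]
          have hlen' : (pre ++ head :: suf).length = tail.length := by
            rw [hdecomp]; simp
          have hrec := ih tail.length htl (pre ++ head :: suf) (out ++ [m])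
            (by rw [hlen'])
          -- the odd sublists of tail and of the swapped tail
          have hft : tail.filter pvOddB = pre.filter pvOddB ++ m :: suf.filter pvOddB := by
            rw [hdecomp]; simp [hmodd]
          have hft' : (pre ++ head :: suf).filter pvOddB
              = pre.filter pvOddB ++ head :: suf.filter pvOddB := by
            simp [hb]
          set S' := PySem.List.sorted ((pre ++ head :: suf).filter pvOddB) (fun v => v) false
            with hS'
          -- sorted odds of head :: tail is m followed by sorted odds of the swapped tail
          have hkey : PySem.List.sorted ((head :: tail).filter pvOddB) (fun v => v) false
              = m :: S' := by
            apply PySem.List.sorted_id_eq_of_perm_of_pairwise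
            · have h1 : S'.Perm (pre.filter pvOddB ++ head :: suf.filter pvOddB) := by
                rw [hS', ← hft']
                exact PySem.List.sorted_perm _ _ _
              rw [hfilt, hft]
              exact (List.Perm.cons m h1).trans
                ((List.Perm.cons m List.perm_middle).trans
                  ((List.Perm.swap head m _).trans
                    (List.Perm.cons head List.perm_middle.symm)))
            · refine List.pairwise_cons.mpr ⟨?_, PySem.List.sorted_pairwise _ _⟩
              intro y hy
              have hy' : y ∈ (pre ++ head :: suf).filter pvOddB :=
                ((PySem.List.sorted_perm _ _ _).mem_iff).mp (hS' ▸ hy)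
              rw [hft'] at hy'
              rcases List.mem_append.mp hy' with h1 | h2
              · have := List.mem_filter.mp h1
                exact hall y (by rw [hdecomp]; exact List.mem_append_left _ this.1) this.2
              · rcases List.mem_cons.mp h2 with rfl | h3
                · exact hleh
                · have := List.mem_filter.mp h3
                  exact hall y
                    (by rw [hdecomp]
                        exact List.mem_append_right _ (List.mem_cons_of_mem _ this.1)) this.2
          -- fill: the head slot takes m, the rest is filled identically for tail and the swapped tail
          have hfill : pvFill tail S' = pvFill (pre ++ head :: suf) S' := by
            apply pvFill_congr
            · rw [hdecomp]
              simp [pvSent_odd hmodd', pvSent_odd hh]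
            · have h1 : tail.countP pvOddB = (pre ++ head :: suf).countP pvOddB := by
                rw [hdecomp]; simp [hmodd, hb]
              have h2 : S'.length = ((pre ++ head :: suf).filter pvOddB).length := by
                rw [hS']; exact (PySem.List.sorted_perm _ _ _).length_eq
              rw [h1, h2, List.countP_eq_length_filter]
          have hstep : pvFill (head :: tail) (m :: S') = m :: pvFill tail S' := by
            simp only [pvFill]; rw [if_neg hh]
          simp only [pvLoopB, if_neg hh, ← hm, if_pos hlt, hk]
          rw [hset, hrec, hkey, hstep, hfill]
          simp
        · -- head itself is the minimum odd: emit it unmoved, recurse on tail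
          have hmh : m = head := le_antisymm hleh (not_lt.mp hlt)
          have hrec := ih tail.length htl tail (out ++ [m]) rfl
          have hkey : PySem.List.sorted ((head :: tail).filter pvOddB) (fun v => v) false
              = head :: PySem.List.sorted (tail.filter pvOddB) (fun v => v) false := by
            rw [hfilt]
            apply sorted_cons_min
            intro y hy
            have := List.mem_filter.mp hy
            rw [← hmh]
            exact hall y this.1 this.2
          have hstep : pvFill (head :: tail)
                (head :: PySem.List.sorted (tail.filter pvOddB) (fun x => x) false)
              = head :: pvFill tail (PySem.List.sorted (tail.filter pvOddB) (fun x => x) false) := by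
            simp only [pvFill]; rw [if_neg hh]
          simp only [pvLoopB, if_neg hh, ← hm, if_neg hlt]
          rw [hrec, hkey, hstep]
          simp [hmh]

-- ===== VERDICT (by name: the statement is the Claim_ definition above) =====
theorem sort_odds_only_spec : Claim_equal_sort_odds_only := by
  intro src _
  unfold Spec_sort_odds_only
  show sort_odds_only src = sort_odds_only_alt src
  have hA : sort_odds_only src
      = pvFill src (PySem.List.sorted (src.filter pvOddB) (fun x => x) false) := by
    unfold sort_odds_only
    rw [phase1 src [] []]
    simp only [List.nil_append]
    rw [sorted_rev_eq_reverse]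
    apply fillA_eq
    rw [(PySem.List.sorted_perm (src.filter pvOddB) (fun x => x) false).length_eq,
      ← List.countP_eq_length_filter]
  have hB : sort_odds_only_alt src
      = pvFill src (PySem.List.sorted (src.filter pvOddB) (fun x => x) false) := by
    unfold sort_odds_only_alt
    simpa using loopB_eq src.length src [] rfl
  rw [hA, hB]
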